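-- pv_equiv track=rewrite | github.com/VolumeQuant/quant_py-main | backtest/final_optimization.py | generate_weight_grid
-- ===== SOURCE A (Python) =====
-- def generate_weight_grid(step=5, min_w=10, max_w=40):
--     combos = []
--     for v in range(min_w, max_w + 1, step):
--         for q in range(min_w, max_w + 1, step):
--             for g in range(min_w, max_w + 1, step):
--                 m = 100 - v - q - g
--                 if min_w <= m <= max_w:
--                     combos.append((v, q, g, m))
--     return combos
-- ===== SOURCE B (Python) =====
-- def generate_weight_grid(step=5, min_w=10, max_w=40):
--     combos = []
--     for v in range(min_w, max_w + 1, step):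
--         for q in range(min_w, max_w + 1, step):
--             r = 100 - v - q
--             # feasible g values: grid points with min_w <= 100-v-q-g <= max_w
--             lo = max(min_w, r - max_w)
--             hi = min(max_w, r - min_w)
--             if lo > hi:
--                 continue
--             # snap lo up to the next grid point min_w + k*step
--             start = min_w + -(-(lo - min_w) // step) * step
--             for g in range(start, hi + 1, step):
--                 combos.append((v, q, g, r - g))
--     return combos
-- ===== Notes on version B (the rewrite author's own statement) =====
-- stated objective: faster
-- what changed: The innermost loop that enumerates every grid value of g and filters by the bound test on m is replaced by computing the feasible interval [lo, hi] for g per (v, q), snapping lo up to the step grid, and iterating only that sub-range with no in-range test; Pre_ excludes only step = 0, on which range raises ValueError in both.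
import Mathlib
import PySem

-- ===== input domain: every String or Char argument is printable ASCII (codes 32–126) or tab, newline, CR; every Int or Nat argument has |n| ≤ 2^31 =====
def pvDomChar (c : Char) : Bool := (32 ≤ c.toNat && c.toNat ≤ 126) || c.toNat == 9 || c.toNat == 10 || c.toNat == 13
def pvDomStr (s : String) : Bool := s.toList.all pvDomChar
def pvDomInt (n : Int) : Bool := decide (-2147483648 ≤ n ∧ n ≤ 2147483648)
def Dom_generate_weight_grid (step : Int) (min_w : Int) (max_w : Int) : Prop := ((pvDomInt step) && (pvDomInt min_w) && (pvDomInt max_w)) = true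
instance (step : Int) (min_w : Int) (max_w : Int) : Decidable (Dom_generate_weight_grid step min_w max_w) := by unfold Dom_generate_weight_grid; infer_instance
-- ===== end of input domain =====

-- B replaces A's innermost enumerate-and-filter loop by a derived feasible interval for g
-- (lower bound snapped up to the step grid), appending with no in-range test; objective: faster (constant factor).

-- ===== PORT A =====
def generate_weight_grid (step : Int) (min_w : Int) (max_w : Int) : List (Int × Int × Int × Int) :=
  (PySem.List.pyRange min_w (max_w + 1) step).foldl (fun combos v =>
    (PySem.List.pyRange min_w (max_w + 1) step).foldl (fun combos q =>
      (PySem.List.pyRange min_w (max_w + 1) step).foldl (fun combos g =>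
        let m := 100 - v - q - g
        if min_w ≤ m ∧ m ≤ max_w then combos ++ [(v, q, g, m)] else combos) combos) combos) []

-- ===== PORT B =====
def generate_weight_grid_alt (step : Int) (min_w : Int) (max_w : Int) : List (Int × Int × Int × Int) :=
  (PySem.List.pyRange min_w (max_w + 1) step).foldl (fun combos v =>
    (PySem.List.pyRange min_w (max_w + 1) step).foldl (fun combos q =>
      let r := 100 - v - q
      let lo := max min_w (r - max_w)
      let hi := min max_w (r - min_w)
      if lo > hi then combos
      else
        let start := min_w + -(PySem.Int.floordiv (-(lo - min_w)) step) * step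
        (PySem.List.pyRange start (hi + 1) step).foldl (fun combos g =>
          combos ++ [(v, q, g, r - g)]) combos) combos) []

-- ===== PRECONDITION & SPEC =====
-- Pre_ excludes exactly step = 0, on which Python's range raises ValueError in A (and in B).
def Pre_generate_weight_grid (step : Int) (min_w : Int) (max_w : Int) : Prop := step ≠ 0
instance (step : Int) (min_w : Int) (max_w : Int) : Decidable (Pre_generate_weight_grid step min_w max_w) := by unfold Pre_generate_weight_grid; infer_instance
def pvWitness_generate_weight_grid : Int × Int × Int := (5, 10, 40)

def Spec_generate_weight_grid (step : Int) (min_w : Int) (max_w : Int) (out : List (Int × Int × Int × Int)) : Prop := out = generate_weight_grid_alt step min_w max_w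
instance (step : Int) (min_w : Int) (max_w : Int) (out : List (Int × Int × Int × Int)) : Decidable (Spec_generate_weight_grid step min_w max_w out) := by unfold Spec_generate_weight_grid; infer_instance

-- ===== CLAIM (what is proved, stated in full; the proofs are below) =====
def Claim_equal_generate_weight_grid : Prop := ∀ (step : Int) (min_w : Int) (max_w : Int), Dom_generate_weight_grid step min_w max_w → Pre_generate_weight_grid step min_w max_w → Spec_generate_weight_grid step min_w max_w (generate_weight_grid step min_w max_w)

-- ===== LEMMAS AND PROOFS =====

-- a positive-step pyRange is strictly increasing
lemma pyRange_pos_pairwise (a b s : Int) (hs : 0 < s) :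
    (PySem.List.pyRange a b s).Pairwise (· < ·) := by
  rw [PySem.List.pyRange_of_pos a b hs]
  exact List.pairwise_lt_range.map _ (fun k j h => by
    have : (k : Int) < j := by exact_mod_cast h
    nlinarith)

lemma pyRange_pos_nil (a b s : Int) (hs : 0 < s) (h : b ≤ a) :
    PySem.List.pyRange a b s = [] := by
  rw [PySem.List.pyRange_of_pos a b hs]
  simp [show ¬ a < b by omega]

lemma pyRange_neg_nil (a b s : Int) (hs : s < 0) (h : a ≤ b) :
    PySem.List.pyRange a b s = [] := by
  simp only [PySem.List.pyRange]
  rw [if_neg (by omega)]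
  simp [show ¬ 0 < s by omega, show ¬ b < a by omega]

-- the snapped-up start point: first grid point ≥ lo (off = lo - min_w ≥ 0)
lemma fdiv_start_facts (s off : Int) (hs : 0 < s) (hoff : 0 ≤ off) :
    off ≤ -((-off).fdiv s) * s ∧ -((-off).fdiv s) * s < off + s := by
  have hfd : (-off).fdiv s = (-off) / s := by
    rw [Int.fdiv_eq_ediv]; simp [le_of_lt hs]
  rw [hfd]
  have hq : s * ((-off) / s) + (-off) % s = -off := Int.ediv_add_emod _ _
  have h1 : 0 ≤ (-off) % s := Int.emod_nonneg _ (by omega)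
  have h2 : (-off) % s < s := Int.emod_lt_of_pos _ hs
  constructor <;> linarith

-- core: the filtered positive-step range IS the aligned feasible range
lemma filter_range_eq (s mn mx r : Int) (hs : 0 < s) :
    (PySem.List.pyRange mn (mx + 1) s).filter
        (fun g => decide (mn ≤ r - g ∧ r - g ≤ mx))
      = PySem.List.pyRange
          (mn + -(PySem.Int.floordiv (-(max mn (r - mx) - mn)) s) * s)
          (min mx (r - mn) + 1) s := by
  set lo := max mn (r - mx) with hlo
  set hi := min mx (r - mn) with hhi
  have hoff : 0 ≤ lo - mn := by omega
  obtain ⟨hst1, hst2⟩ := fdiv_start_facts s (lo - mn) hs hoff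
  set k := -((-(lo - mn)).fdiv s) with hk
  have hdvd : s ∣ k * s := Dvd.intro_left k rfl
  have hpw1 : ((PySem.List.pyRange mn (mx + 1) s).filter
      (fun g => decide (mn ≤ r - g ∧ r - g ≤ mx))).Pairwise (· < ·) :=
    (pyRange_pos_pairwise mn (mx + 1) s hs).filter _
  have hpw2 : (PySem.List.pyRange (mn + k * s) (hi + 1) s).Pairwise (· < ·) :=
    pyRange_pos_pairwise _ _ s hs
  have hmem : ∀ x : Int,
      x ∈ (PySem.List.pyRange mn (mx + 1) s).filter
        (fun g => decide (mn ≤ r - g ∧ r - g ≤ mx))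
      ↔ x ∈ PySem.List.pyRange (mn + k * s) (hi + 1) s := by
    intro x
    rw [List.mem_filter]
    rw [PySem.List.mem_pyRange_iff_of_pos hs, PySem.List.mem_pyRange_iff_of_pos hs]
    simp only [decide_eq_true_eq]
    constructor
    · rintro ⟨⟨hx1, hx2, t, ht⟩, hm1, hm2⟩
      have hdx : s ∣ x - (mn + k * s) := by
        obtain ⟨u, hu⟩ := hdvd
        exact ⟨t - u, by rw [mul_sub]; omega⟩
      refine ⟨?_, by omega, hdx⟩
      by_contra hcon
      push_neg at hcon
      have hpos : 0 < (mn + k * s) - x := by omega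
      have hd2 : s ∣ (mn + k * s) - x := by
        rw [show (mn + k * s) - x = -(x - (mn + k * s)) by ring]
        exact dvd_neg.mpr hdx
      have := Int.le_of_dvd hpos hd2
      omega
    · rintro ⟨hx1, hx2, t, ht⟩
      obtain ⟨u, hu⟩ := hdvd
      exact ⟨⟨by omega, by omega, u + t, by rw [mul_add]; omega⟩, by omega, by omega⟩
  have hnd1 := hpw1.imp (fun h => ne_of_lt h)
  have hnd2 := hpw2.imp (fun h => ne_of_lt h)
  exact ((List.perm_ext_iff_of_nodup hnd1 hnd2).mpr hmem).eq_of_pairwise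
    (fun a b _ _ h1 h2 => absurd h2 (lt_asymm h1)) hpw1 hpw2

lemma ite_append {α : Type} (c : Prop) [Decidable c] (acc m : List α) :
    (if c then acc else acc ++ m) = acc ++ (if c then [] else m) := by
  split <;> simp

-- ===== VERDICT (by name: the statement is the Claim_ definition above) =====
theorem generate_weight_grid_spec : Claim_equal_generate_weight_grid := by
  intro s mn mx _hdom hpre
  unfold Spec_generate_weight_grid generate_weight_grid generate_weight_grid_alt
  simp only [PySem.List.foldl_append_ite, PySem.List.foldl_append_singleton_eq_map,
    ite_append, PySem.List.foldl_append_eq_flatMap, List.nil_append]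
  rcases lt_trichotomy s 0 with hneg | h0 | hpos
  · by_cases hmn : mn ≤ mx
    · rw [pyRange_neg_nil mn (mx + 1) s hneg (by omega)]
      simp
    · congr 1
      funext v
      congr 1
      funext q
      have hfil : (PySem.List.pyRange mn (mx + 1) s).filter
          (fun g => decide (mn ≤ 100 - v - q - g ∧ 100 - v - q - g ≤ mx)) = [] := by
        rw [List.filter_eq_nil_iff]
        intro g _
        simp only [decide_eq_true_eq, not_and]
        omega
      rw [hfil, if_pos (by omega : max mn (100 - v - q - mx) > min mx (100 - v - q - mn))]
      simp
  · exact absurd h0 hpre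
  · congr 1
    funext v
    congr 1
    funext q
    rw [filter_range_eq s mn mx (100 - v - q) hpos]
    by_cases h : max mn (100 - v - q - mx) > min mx (100 - v - q - mn)
    · rw [if_pos h]
      simp only [PySem.Int.floordiv]
      obtain ⟨h1, _⟩ := fdiv_start_facts s (max mn (100 - v - q - mx) - mn) hpos (by omega)
      rw [pyRange_pos_nil _ _ s hpos (by omega)]
      simp
    · rw [if_neg h]
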